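-- pv_equiv track=rewrite | github.com/TM23-sanji/algo_reasoning_env | pipeline/regenerate_test_harnesses.py | truncate_python_tests
-- ===== SOURCE A (Python) =====
-- def truncate_python_tests(python_tests: str, max_asserts: int = 30) -> str:
--     """
--     Truncate Python tests to limit the number of assert statements.
--
--     Args:
--         python_tests: Python test code (def check(candidate): ...)
--         max_asserts: Maximum number of assert statements to keep
--
--     Returns:
--         Truncated Python test code
--     """
--     if max_asserts <= 0:
--         return python_tests
--
--     # Split into lines
--     lines = python_tests.split("\n")
--
--     # Find the function definition line
--     result_lines = []
--     assert_count = 0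
--
--     for line in lines:
--         result_lines.append(line)
--         # Count assert statements (not inside strings)
--         if line.strip().startswith("assert "):
--             assert_count += 1
--             if assert_count >= max_asserts:
--                 # Keep the function definition (first line) and stop at max asserts
--                 break
--
--     return "\n".join(result_lines)
-- ===== SOURCE B (Python) =====
-- def truncate_python_tests(python_tests: str, max_asserts: int = 30) -> str:
--     if max_asserts <= 0:
--         return python_tests
--     lines = python_tests.split("\n")
--     positions = [i for i, line in enumerate(lines) if line.strip().startswith("assert ")]
--     if len(positions) >= max_asserts:
--         return "\n".join(lines[:positions[max_asserts - 1] + 1])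
--     return "\n".join(lines)
-- ===== Notes on version B (the rewrite author's own statement) =====
-- stated objective: alternative
-- what changed: Replaces the stateful append-count-break loop by a precomputed position table of assert-line indices built with a comprehension, cutting the line list by slicing at the max_asserts-th position.
import Mathlib
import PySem

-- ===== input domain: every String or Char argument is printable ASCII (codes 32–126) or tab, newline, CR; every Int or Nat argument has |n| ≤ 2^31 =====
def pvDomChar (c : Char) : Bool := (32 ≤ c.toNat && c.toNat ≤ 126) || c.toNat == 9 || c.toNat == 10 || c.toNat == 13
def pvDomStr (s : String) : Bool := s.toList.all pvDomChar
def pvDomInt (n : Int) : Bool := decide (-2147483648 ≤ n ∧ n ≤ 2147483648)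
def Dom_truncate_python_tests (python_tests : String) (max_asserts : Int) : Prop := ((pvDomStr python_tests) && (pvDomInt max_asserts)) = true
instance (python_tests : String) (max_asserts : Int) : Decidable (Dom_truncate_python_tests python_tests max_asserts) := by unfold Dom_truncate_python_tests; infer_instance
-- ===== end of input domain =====

-- B builds a position table of assert-line indices and cuts by slicing, instead of A's
-- append-count-break loop; same cost (objective: alternative).

-- shared one-line predicate: line.strip().startswith("assert ")
def pvIsAssertLine (l : List Char) : Bool :=
  PySem.Chars.startswith (PySem.Chars.strip l) "assert ".toList

-- ===== PORT A =====
-- the for-loop with counter and break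
def pvGoA (ma : Int) : List (List Char) → Int → List (List Char) → List (List Char)
  | [], _, acc => acc
  | l :: rest, cnt, acc =>
    if pvIsAssertLine l then
      if cnt + 1 ≥ ma then acc ++ [l]
      else pvGoA ma rest (cnt + 1) (acc ++ [l])
    else pvGoA ma rest cnt (acc ++ [l])

def truncate_python_tests (python_tests : String) (max_asserts : Int) : String :=
  if max_asserts ≤ 0 then python_tests
  else
    let lines := PySem.Chars.splitOn python_tests.toList ['\n']
    String.ofList (PySem.Chars.join ['\n'] (pvGoA max_asserts lines 0 []))

-- ===== PORT B =====
def truncate_python_tests_alt (python_tests : String) (max_asserts : Int) : String :=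
  if max_asserts ≤ 0 then python_tests
  else
    let lines := PySem.Chars.splitOn python_tests.toList ['\n']
    let positions : List Int :=
      ((PySem.List.enumerate lines).filter (fun p => pvIsAssertLine p.2)).map (·.1)
    if (positions.length : Int) ≥ max_asserts then
      -- positions[max_asserts-1] is in range under the guard (Python indexing); pyGetD is exact there
      String.ofList (PySem.Chars.join ['\n']
        (PySem.List.slice lines none (some (PySem.List.pyGetD positions (max_asserts - 1) 0 + 1))))
    else String.ofList (PySem.Chars.join ['\n'] lines)

-- ===== PRECONDITION & SPEC =====
def Spec_truncate_python_tests (python_tests : String) (max_asserts : Int) (out : String) : Prop := out = truncate_python_tests_alt python_tests max_asserts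
instance (python_tests : String) (max_asserts : Int) (out : String) : Decidable (Spec_truncate_python_tests python_tests max_asserts out) := by unfold Spec_truncate_python_tests; infer_instance

-- ===== CLAIM (what is proved, stated in full; the proofs are below) =====
def Claim_equal_truncate_python_tests : Prop := ∀ (python_tests : String) (max_asserts : Int), Dom_truncate_python_tests python_tests max_asserts → Spec_truncate_python_tests python_tests max_asserts (truncate_python_tests python_tests max_asserts)

-- ===== LEMMAS AND PROOFS =====

-- index (0-based) of the k-th assert line (k ≥ 1), none if there are fewer than k
def pvCut (k : Nat) : List (List Char) → Option Nat
  | [] => none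
  | l :: rest =>
    if pvIsAssertLine l then
      if k ≤ 1 then some 0 else (pvCut (k - 1) rest).map (· + 1)
    else (pvCut k rest).map (· + 1)

theorem pvGoA_eq (ma : Int) (lines : List (List Char)) :
    ∀ (cnt : Int) (acc : List (List Char)), cnt < ma →
    pvGoA ma lines cnt acc =
      acc ++ (match pvCut (ma - cnt).toNat lines with
               | some p => lines.take (p + 1)
               | none => lines) := by
  induction lines with
  | nil => intro cnt acc h; simp [pvGoA, pvCut]
  | cons l rest ih =>
    intro cnt acc h
    by_cases hp : pvIsAssertLine l
    · by_cases hb : cnt + 1 ≥ ma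
      · have hk : (ma - cnt).toNat = 1 := by omega
        simp [pvGoA, hp, hb, pvCut, hk]
      · have hk1 : ¬ (ma - cnt).toNat ≤ 1 := by omega
        have hk2 : (ma - cnt).toNat - 1 = (ma - (cnt + 1)).toNat := by omega
        rw [pvGoA, if_pos hp, if_neg hb, ih (cnt + 1) (acc ++ [l]) (by omega)]
        simp only [pvCut, hp, if_true, if_neg hk1, hk2]
        cases pvCut (ma - (cnt + 1)).toNat rest <;> simp
    · rw [pvGoA, if_neg hp, ih cnt (acc ++ [l]) h]
      simp only [pvCut, hp, Bool.false_eq_true, if_false]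
      cases pvCut (ma - cnt).toNat rest <;> simp

theorem pvPos_get (lines : List (List Char)) :
    ∀ (s : Int) (j : Nat),
    (((PySem.List.enumerate lines s).filter (fun p => pvIsAssertLine p.2)).map (·.1))[j]? =
      (pvCut (j + 1) lines).map (fun p : Nat => s + p) := by
  induction lines with
  | nil => intro s j; simp [PySem.List.enumerate_nil, pvCut]
  | cons l rest ih =>
    intro s j
    by_cases hp : pvIsAssertLine l
    · cases j with
      | zero => simp [PySem.List.enumerate_cons, hp, pvCut]
      | succ j =>
        simp only [PySem.List.enumerate_cons, List.filter_cons, hp, if_true, List.map_cons,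
          List.getElem?_cons_succ, ih (s + 1) j, pvCut]
        have h1 : ¬ (j + 1 + 1 ≤ 1) := by omega
        have h2 : j + 1 + 1 - 1 = j + 1 := rfl
        simp only [if_neg h1, h2]
        cases pvCut (j + 1) rest with
        | none => simp
        | some p => simp; ring
    · simp only [PySem.List.enumerate_cons, List.filter_cons, hp, Bool.false_eq_true, if_false,
        ih (s + 1) j, pvCut]
      cases pvCut (j + 1) rest with
      | none => simp
      | some p => simp; ring

theorem pvPos_length (lines : List (List Char)) (s : Int) :
    (((PySem.List.enumerate lines s).filter (fun p => pvIsAssertLine p.2)).map (·.1)).length =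
      lines.countP pvIsAssertLine := by
  induction lines generalizing s with
  | nil => simp [PySem.List.enumerate_nil]
  | cons l rest ih =>
    by_cases hp : pvIsAssertLine l <;>
      simp [PySem.List.enumerate_cons, hp, ih]

-- ===== VERDICT (by name: the statement is the Claim_ definition above) =====
theorem truncate_python_tests_spec : Claim_equal_truncate_python_tests := by
  intro pt ma _
  unfold Spec_truncate_python_tests truncate_python_tests truncate_python_tests_alt
  by_cases hma : ma ≤ 0
  · simp only [hma, if_true]
  · simp only [hma, if_false]
    have hget := pvPos_get (PySem.Chars.splitOn pt.toList ['\n']) 0 (ma.toNat - 1)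
    have hlen := pvPos_length (PySem.Chars.splitOn pt.toList ['\n']) 0
    have hk : ma.toNat - 1 + 1 = ma.toNat := by omega
    rw [hk] at hget
    have hma1 : (ma - 0).toNat = ma.toNat := by omega
    rw [pvGoA_eq ma _ 0 [] (by omega), hma1]
    cases hc : pvCut ma.toNat (PySem.Chars.splitOn pt.toList ['\n']) with
    | none =>
      rw [hc] at hget
      simp only [Option.map_none] at hget
      have hle := List.getElem?_eq_none_iff.mp hget
      have hen : ¬ ((((PySem.List.enumerate (PySem.Chars.splitOn pt.toList ['\n'])).filter
          (fun p => pvIsAssertLine p.2)).map (·.1)).length : Int) ≥ ma := by omega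
      simp only [hen, if_false, List.nil_append]
    | some p =>
      rw [hc] at hget
      simp only [Option.map_some] at hget
      have hlt : ma.toNat - 1 < (((PySem.List.enumerate (PySem.Chars.splitOn pt.toList ['\n'])).filter
          (fun q => pvIsAssertLine q.2)).map (·.1)).length := by
        by_contra hge
        rw [List.getElem?_eq_none_iff.mpr (by omega)] at hget
        simp at hget
      have hen : ((((PySem.List.enumerate (PySem.Chars.splitOn pt.toList ['\n'])).filter
          (fun p => pvIsAssertLine p.2)).map (·.1)).length : Int) ≥ ma := by omega
      simp only [hen, if_true]
      have hval : PySem.List.pyGetD (((PySem.List.enumerate (PySem.Chars.splitOn pt.toList ['\n'])).filter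
          (fun q => pvIsAssertLine q.2)).map (·.1)) (ma - 1) 0 = (p : Int) := by
        have hcast : (ma - 1) = ((ma.toNat - 1 : Nat) : Int) := by omega
        rw [hcast, PySem.List.pyGetD_natCast, List.getD, hget]
        simp
      rw [hval]
      rw [PySem.List.slice_to _ (by omega)]
      have htn : ((p : Int) + 1).toNat = p + 1 := by omega
      rw [htn, List.nil_append]
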